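-- pv_equiv track=rewrite | github.com/jackc0re/VibeLearning | docs/14_debugging/03_reading_tracebacks/exercises.py | exercise_3_categorize_exception
-- ===== SOURCE A (Python) =====
-- def exercise_3_categorize_exception(exception_type: str) -> str:
--     """
--     Categorize an exception type into a general category.
--
--     Categories:
--     - "lookup": KeyError, IndexError, AttributeError
--     - "type": TypeError, ValueError
--     - "io": FileNotFoundError, IOError, PermissionError
--     - "syntax": SyntaxError, IndentationError
--     - "name": NameError, ImportError, ModuleNotFoundError
--     - "runtime": ZeroDivisionError, RecursionError, MemoryError
--     - "other": anything else
--     """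
--     categories = {
--         "lookup": ["KeyError", "IndexError", "AttributeError"],
--         "type": ["TypeError", "ValueError"],
--         "io": ["FileNotFoundError", "IOError", "PermissionError", "OSError"],
--         "syntax": ["SyntaxError", "IndentationError", "TabError"],
--         "name": ["NameError", "ImportError", "ModuleNotFoundError", "UnboundLocalError"],
--         "runtime": ["ZeroDivisionError", "RecursionError", "MemoryError", "OverflowError"],
--     }
--
--     for category, exceptions in categories.items():
--         if exception_type in exceptions:
--             return category
--     return "other"
-- ===== SOURCE B (Python) =====
-- def exercise_3_categorize_exception(exception_type: str) -> str:
--     # Decision tree: dispatch on the first character, then confirm the full name.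
--     c = exception_type[:1]
--     if c == "A":
--         return "lookup" if exception_type == "AttributeError" else "other"
--     if c == "F":
--         return "io" if exception_type == "FileNotFoundError" else "other"
--     if c == "I":
--         if exception_type == "IndexError":
--             return "lookup"
--         if exception_type == "IOError":
--             return "io"
--         if exception_type == "IndentationError":
--             return "syntax"
--         if exception_type == "ImportError":
--             return "name"
--         return "other"
--     if c == "K":
--         return "lookup" if exception_type == "KeyError" else "other"
--     if c == "M":
--         if exception_type == "ModuleNotFoundError":
--             return "name"
--         if exception_type == "MemoryError":
--             return "runtime"
--         return "other"
--     if c == "N":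
--         return "name" if exception_type == "NameError" else "other"
--     if c == "O":
--         if exception_type == "OSError":
--             return "io"
--         if exception_type == "OverflowError":
--             return "runtime"
--         return "other"
--     if c == "P":
--         return "io" if exception_type == "PermissionError" else "other"
--     if c == "R":
--         return "runtime" if exception_type == "RecursionError" else "other"
--     if c == "S":
--         return "syntax" if exception_type == "SyntaxError" else "other"
--     if c == "T":
--         if exception_type == "TypeError":
--             return "type"
--         if exception_type == "TabError":
--             return "syntax"
--         return "other"
--     if c == "U":
--         return "name" if exception_type == "UnboundLocalError" else "other"
--     if c == "V":
--         return "type" if exception_type == "ValueError" else "other"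
--     if c == "Z":
--         return "runtime" if exception_type == "ZeroDivisionError" else "other"
--     return "other"
-- ===== Notes on version B (the rewrite author's own statement) =====
-- stated objective: alternative
-- what changed: Replaces A's loop over a category->list-of-names dict with per-list membership scans by a hand-built decision tree that dispatches on the first character of the name and then confirms with at most four full-name comparisons; no dict or list of categories exists in B.
import Mathlib
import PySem

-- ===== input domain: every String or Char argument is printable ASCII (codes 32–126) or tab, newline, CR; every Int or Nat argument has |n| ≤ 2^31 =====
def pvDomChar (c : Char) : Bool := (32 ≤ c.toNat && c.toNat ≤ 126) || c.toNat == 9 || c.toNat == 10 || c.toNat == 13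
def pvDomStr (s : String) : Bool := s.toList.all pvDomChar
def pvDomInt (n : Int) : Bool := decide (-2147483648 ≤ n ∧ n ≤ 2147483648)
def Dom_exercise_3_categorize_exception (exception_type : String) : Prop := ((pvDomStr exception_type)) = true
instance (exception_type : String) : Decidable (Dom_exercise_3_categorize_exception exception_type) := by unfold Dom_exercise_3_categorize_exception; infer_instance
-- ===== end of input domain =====

-- B replaces A's loop over category name-lists by a first-character decision tree ("alternative").

-- ===== PORT A =====
-- the `for category, exceptions in categories.items(): if exception_type in exceptions: return category` loop
def pvLoopA (exception_type : String) : List (String × List String) → String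
  | [] => "other"
  | (category, exceptions) :: rest =>
      if exceptions.contains exception_type then category else pvLoopA exception_type rest

def exercise_3_categorize_exception (exception_type : String) : String :=
  let categories : List (String × List String) := [
    ("lookup", ["KeyError", "IndexError", "AttributeError"]),
    ("type", ["TypeError", "ValueError"]),
    ("io", ["FileNotFoundError", "IOError", "PermissionError", "OSError"]),
    ("syntax", ["SyntaxError", "IndentationError", "TabError"]),
    ("name", ["NameError", "ImportError", "ModuleNotFoundError", "UnboundLocalError"]),
    ("runtime", ["ZeroDivisionError", "RecursionError", "MemoryError", "OverflowError"])]
  pvLoopA exception_type categories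

-- ===== PORT B =====
-- Source B: c = exception_type[:1], then a decision tree on c confirming full names
def exercise_3_categorize_exception_alt (exception_type : String) : String :=
  let c := PySem.Str.slice exception_type none (some 1)
  if c = "A" then (if exception_type = "AttributeError" then "lookup" else "other")
  else if c = "F" then (if exception_type = "FileNotFoundError" then "io" else "other")
  else if c = "I" then
    (if exception_type = "IndexError" then "lookup"
     else if exception_type = "IOError" then "io"
     else if exception_type = "IndentationError" then "syntax"
     else if exception_type = "ImportError" then "name"
     else "other")
  else if c = "K" then (if exception_type = "KeyError" then "lookup" else "other")
  else if c = "M" then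
    (if exception_type = "ModuleNotFoundError" then "name"
     else if exception_type = "MemoryError" then "runtime"
     else "other")
  else if c = "N" then (if exception_type = "NameError" then "name" else "other")
  else if c = "O" then
    (if exception_type = "OSError" then "io"
     else if exception_type = "OverflowError" then "runtime"
     else "other")
  else if c = "P" then (if exception_type = "PermissionError" then "io" else "other")
  else if c = "R" then (if exception_type = "RecursionError" then "runtime" else "other")
  else if c = "S" then (if exception_type = "SyntaxError" then "syntax" else "other")
  else if c = "T" then
    (if exception_type = "TypeError" then "type"
     else if exception_type = "TabError" then "syntax"
     else "other")
  else if c = "U" then (if exception_type = "UnboundLocalError" then "name" else "other")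
  else if c = "V" then (if exception_type = "ValueError" then "type" else "other")
  else if c = "Z" then (if exception_type = "ZeroDivisionError" then "runtime" else "other")
  else "other"

-- ===== PRECONDITION & SPEC =====
def Spec_exercise_3_categorize_exception (exception_type : String) (out : String) : Prop := out = exercise_3_categorize_exception_alt exception_type
instance (exception_type : String) (out : String) : Decidable (Spec_exercise_3_categorize_exception exception_type out) := by unfold Spec_exercise_3_categorize_exception; infer_instance

-- ===== CLAIM (what is proved, stated in full; the proofs are below) =====
def Claim_equal_exercise_3_categorize_exception : Prop := ∀ (exception_type : String), Dom_exercise_3_categorize_exception exception_type → Spec_exercise_3_categorize_exception exception_type (exercise_3_categorize_exception exception_type)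

-- ===== LEMMAS AND PROOFS =====

-- ===== VERDICT (by name: the statement is the Claim_ definition above) =====
theorem exercise_3_categorize_exception_spec : Claim_equal_exercise_3_categorize_exception := by
  intro exception_type _
  unfold Spec_exercise_3_categorize_exception
  by_cases h1 : exception_type = "KeyError"
  · subst h1; rfl
  by_cases h2 : exception_type = "IndexError"
  · subst h2; rfl
  by_cases h3 : exception_type = "AttributeError"
  · subst h3; rfl
  by_cases h4 : exception_type = "TypeError"
  · subst h4; rfl
  by_cases h5 : exception_type = "ValueError"
  · subst h5; rfl
  by_cases h6 : exception_type = "FileNotFoundError"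
  · subst h6; rfl
  by_cases h7 : exception_type = "IOError"
  · subst h7; rfl
  by_cases h8 : exception_type = "PermissionError"
  · subst h8; rfl
  by_cases h9 : exception_type = "OSError"
  · subst h9; rfl
  by_cases h10 : exception_type = "SyntaxError"
  · subst h10; rfl
  by_cases h11 : exception_type = "IndentationError"
  · subst h11; rfl
  by_cases h12 : exception_type = "TabError"
  · subst h12; rfl
  by_cases h13 : exception_type = "NameError"
  · subst h13; rfl
  by_cases h14 : exception_type = "ImportError"
  · subst h14; rfl
  by_cases h15 : exception_type = "ModuleNotFoundError"
  · subst h15; rfl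
  by_cases h16 : exception_type = "UnboundLocalError"
  · subst h16; rfl
  by_cases h17 : exception_type = "ZeroDivisionError"
  · subst h17; rfl
  by_cases h18 : exception_type = "RecursionError"
  · subst h18; rfl
  by_cases h19 : exception_type = "MemoryError"
  · subst h19; rfl
  by_cases h20 : exception_type = "OverflowError"
  · subst h20; rfl
  -- neither name matches: A's scan falls through to "other"; B's tree returns "other" in every branch
  have b1 : ("KeyError" == exception_type) = false := by simp [Ne.symm h1]
  have b2 : ("IndexError" == exception_type) = false := by simp [Ne.symm h2]
  have b3 : ("AttributeError" == exception_type) = false := by simp [Ne.symm h3]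
  have b4 : ("TypeError" == exception_type) = false := by simp [Ne.symm h4]
  have b5 : ("ValueError" == exception_type) = false := by simp [Ne.symm h5]
  have b6 : ("FileNotFoundError" == exception_type) = false := by simp [Ne.symm h6]
  have b7 : ("IOError" == exception_type) = false := by simp [Ne.symm h7]
  have b8 : ("PermissionError" == exception_type) = false := by simp [Ne.symm h8]
  have b9 : ("OSError" == exception_type) = false := by simp [Ne.symm h9]
  have b10 : ("SyntaxError" == exception_type) = false := by simp [Ne.symm h10]
  have b11 : ("IndentationError" == exception_type) = false := by simp [Ne.symm h11]
  have b12 : ("TabError" == exception_type) = false := by simp [Ne.symm h12]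
  have b13 : ("NameError" == exception_type) = false := by simp [Ne.symm h13]
  have b14 : ("ImportError" == exception_type) = false := by simp [Ne.symm h14]
  have b15 : ("ModuleNotFoundError" == exception_type) = false := by simp [Ne.symm h15]
  have b16 : ("UnboundLocalError" == exception_type) = false := by simp [Ne.symm h16]
  have b17 : ("ZeroDivisionError" == exception_type) = false := by simp [Ne.symm h17]
  have b18 : ("RecursionError" == exception_type) = false := by simp [Ne.symm h18]
  have b19 : ("MemoryError" == exception_type) = false := by simp [Ne.symm h19]
  simp [exercise_3_categorize_exception, exercise_3_categorize_exception_alt, pvLoopA,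
    b1, b2, b3, b4, b5, b6, b7, b8, b9, b10, b11, b12, b13, b14, b15, b16, b17, b18, b19,
    h1, h2, h3, h4, h5, h6, h7, h8, h9, h10, h11, h12, h13, h14, h15, h16, h17, h18, h19, h20]
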